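-- pv_equiv track=rewrite | github.com/xxNine1Eightxx/GLYPHNOTES_GLYPH_STRING_COMBOS | sigils/sigil_interpreter.py | fill_between_equal_colors_line
-- ===== SOURCE A (Python) =====
-- from typing import List, Dict, Tuple, Optional
--
-- def fill_between_equal_colors_line(arr:List[int])->List[int]:
--     """Bridge zeros between equal colors on a 1D line."""
--     out=arr[:]; n=len(arr); i=0
--     while i<n:
--         if out[i]==0: i+=1; continue
--         c=out[i]; j=i+1
--         while j<n and out[j]==0: j+=1
--         if j<n and out[j]==c:
--             for k in range(i+1,j): out[k]=c
--         i=j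
--     return out
-- ===== SOURCE B (Python) =====
-- from typing import List
--
-- def fill_between_equal_colors_line(arr: List[int]) -> List[int]:
--     """Bridge zeros between equal colors on a 1D line (single streaming pass)."""
--     out = []
--     last = 0      # last nonzero color seen (0 = none yet)
--     zeros = 0     # pending zeros since that color
--     for x in arr:
--         if x == 0:
--             zeros += 1
--         else:
--             filler = x if x == last else 0
--             out.extend([filler] * zeros)
--             out.append(x)
--             last = x
--             zeros = 0
--     out.extend([0] * zeros)
--     return out
-- ===== Notes on version B (the rewrite author's own statement) =====
-- stated objective: alternative
-- what changed: B replaces A's index-based lookahead (scan forward for the next nonzero, then fill the gap in place) by a single streaming pass that carries the last seen color and a pending-zero counter and emits the output list front to back, never indexing or mutating.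
import Mathlib
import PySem

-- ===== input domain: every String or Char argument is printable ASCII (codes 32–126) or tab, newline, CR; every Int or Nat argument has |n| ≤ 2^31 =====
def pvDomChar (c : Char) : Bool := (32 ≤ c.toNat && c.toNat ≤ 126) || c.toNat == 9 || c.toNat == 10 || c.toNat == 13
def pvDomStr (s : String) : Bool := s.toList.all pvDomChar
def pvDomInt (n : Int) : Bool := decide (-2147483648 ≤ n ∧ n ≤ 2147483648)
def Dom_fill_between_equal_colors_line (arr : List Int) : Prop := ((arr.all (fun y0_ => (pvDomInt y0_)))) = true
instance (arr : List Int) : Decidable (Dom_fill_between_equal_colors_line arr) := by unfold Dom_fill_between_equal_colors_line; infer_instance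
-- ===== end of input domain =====

-- B replaces A's index-based lookahead-and-fill-in-place by a single streaming pass with a
-- last-color/pending-zeros accumulator that emits the result front to back (alternative, same cost).

-- ===== PORT A =====
-- 'for k in range(i+1, j): out[k] = c'
def fillSeg (out : List Int) (c : Int) (a b : Nat) : List Int :=
  (PySem.List.pyRange (a : Int) (b : Int) 1).foldl (fun o k => o.set k.toNat c) out

-- inner 'while j < n and out[j] == 0: j += 1'
def findJ (out : List Int) (n j : Nat) : Nat :=
  if h : j < n ∧ out.getD j 0 = 0 then findJ out n (j + 1) else j
termination_by n - j
decreasing_by omega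

theorem findJ_ge (out : List Int) (n j : Nat) : j ≤ findJ out n j := by
  rw [findJ]
  split
  · exact le_trans (Nat.le_succ j) (findJ_ge out n (j + 1))
  · exact le_refl j
termination_by n - j
decreasing_by omega

-- outer 'while i < n: …'
def loopA (n : Nat) (out : List Int) (i : Nat) : List Int :=
  if h : i < n then
    if out.getD i 0 = 0 then loopA n out (i + 1)
    else
      let c := out.getD i 0
      let j := findJ out n (i + 1)
      if j < n ∧ out.getD j 0 = c then loopA n (fillSeg out c (i + 1) j) j
      else loopA n out j
  else out
termination_by n - i
decreasing_by
  · omega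
  · have := findJ_ge out n (i + 1); omega
  · have := findJ_ge out n (i + 1); omega

def fill_between_equal_colors_line (arr : List Int) : List Int :=
  loopA arr.length arr 0

-- ===== PORT B =====
-- state = (out, last, zeros); one fold over the input, then flush the trailing zeros
def stepB (s : List Int × Int × Nat) (x : Int) : List Int × Int × Nat :=
  if x = 0 then (s.1, s.2.1, s.2.2 + 1)
  else (s.1 ++ List.replicate s.2.2 (if x = s.2.1 then x else 0) ++ [x], x, 0)

def fill_between_equal_colors_line_alt (arr : List Int) : List Int :=
  let st := arr.foldl stepB ([], 0, 0)
  st.1 ++ List.replicate st.2.2 0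

-- ===== PRECONDITION & SPEC =====
def Spec_fill_between_equal_colors_line (arr : List Int) (out : List Int) : Prop := out = fill_between_equal_colors_line_alt arr
instance (arr : List Int) (out : List Int) : Decidable (Spec_fill_between_equal_colors_line arr out) := by unfold Spec_fill_between_equal_colors_line; infer_instance

-- ===== CLAIM (what is proved, stated in full; the proofs are below) =====
def Claim_equal_fill_between_equal_colors_line : Prop := ∀ (arr : List Int), Dom_fill_between_equal_colors_line arr → Spec_fill_between_equal_colors_line arr (fill_between_equal_colors_line arr)

-- ===== LEMMAS AND PROOFS =====

-- number of leading zeros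
def lzero (t : List Int) : Nat := (t.takeWhile (fun y => y == 0)).length

-- forward-looking recursive form (matches A's scan-ahead structure)
def fA : List Int → List Int
  | [] => []
  | x :: t =>
    if x = 0 then 0 :: fA t
    else
      let z := lzero t
      if z < t.length then
        x :: ((if t.getD z 0 = x then List.replicate z x else List.replicate z 0) ++ fA (t.drop z))
      else x :: t
termination_by l => l.length
decreasing_by
  · simp
  · simp

def fApost (t : List Int) (c : Int) : List Int :=
  let z := lzero t
  if z < t.length then
    (if t.getD z 0 = c then List.replicate z c else List.replicate z 0) ++ fA (t.drop z)
  else List.replicate z 0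

-- backward-looking recursive form (matches B's streaming structure)
def specB : List Int → Int → Nat → List Int
  | [], _, z => List.replicate z 0
  | x :: t, l, z =>
    if x = 0 then specB t l (z + 1)
    else List.replicate z (if x = l then x else 0) ++ x :: specB t x 0

theorem lzero_le (t : List Int) : lzero t ≤ t.length := by
  unfold lzero; have := List.takeWhile_prefix (l := t) (p := fun y => y == 0)
  exact this.length_le

theorem lzero_cons_zero (t : List Int) : lzero (0 :: t) = lzero t + 1 := by
  simp [lzero, List.takeWhile]

theorem lzero_cons_nz (x : Int) (t : List Int) (h : x ≠ 0) : lzero (x :: t) = 0 := by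
  have hx : (x == 0) = false := by simpa using h
  simp [lzero, List.takeWhile, hx]

theorem take_lzero (t : List Int) : t.take (lzero t) = List.replicate (lzero t) 0 := by
  induction t with
  | nil => simp [lzero]
  | cons x t ih =>
    by_cases h : x = 0
    · subst h; rw [lzero_cons_zero]; simp [List.replicate_succ, ih]
    · rw [lzero_cons_nz x t h]; simp

theorem all_zero_eq_replicate (t : List Int) (h : lzero t = t.length) :
    t = List.replicate t.length 0 := by
  have := take_lzero t
  rw [h, List.take_length] at this
  exact this

-- B's fold equals specB
theorem foldB_eq (t : List Int) : ∀ (out : List Int) (l : Int) (z : Nat),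
    (t.foldl stepB (out, l, z)).1 ++ List.replicate (t.foldl stepB (out, l, z)).2.2 0
      = out ++ specB t l z := by
  induction t with
  | nil => intro out l z; simp [specB]
  | cons x t ih =>
    intro out l z
    by_cases h : x = 0
    · subst h; simp only [List.foldl_cons, stepB, specB]
      exact ih out l (z + 1)
    · simp only [List.foldl_cons, stepB, if_neg h, specB]
      rw [ih]
      simp

theorem alt_eq_specB (arr : List Int) :
    fill_between_equal_colors_line_alt arr = specB arr 0 0 := by
  unfold fill_between_equal_colors_line_alt
  have := foldB_eq arr [] 0 0
  simpa using this

-- consuming the leading zeros of t: the fill value is c iff the next nonzero equals c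
theorem specB_eq_fill (t : List Int) : ∀ (c : Int) (z : Nat),
    specB t c z = List.replicate (z + lzero t)
        (if lzero t < t.length ∧ t.getD (lzero t) 0 = c then c else 0)
      ++ specB (t.drop (lzero t)) c 0 := by
  induction t with
  | nil => intro c z; simp [specB, lzero]
  | cons x t ih =>
    intro c z
    by_cases h : x = 0
    · subst h
      rw [lzero_cons_zero]
      simp only [specB]
      rw [ih c (z + 1)]
      have hd : (((0:Int) :: t).drop (lzero t + 1)) = t.drop (lzero t) := by simp
      have hg : ((0:Int) :: t).getD (lzero t + 1) 0 = t.getD (lzero t) 0 := by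
        simp [List.getD]
      rw [hd, hg]

      have hiff : (lzero t + 1 < ((0:Int) :: t).length ∧ t.getD (lzero t) 0 = c)
          ↔ (lzero t < t.length ∧ t.getD (lzero t) 0 = c) := by
        simp only [List.length_cons]
        constructor
        · rintro ⟨h1, h2⟩; exact ⟨by omega, h2⟩
        · rintro ⟨h1, h2⟩; exact ⟨by omega, h2⟩
      rw [if_congr hiff rfl rfl]
      have : z + 1 + lzero t = z + (lzero t + 1) := by omega
      rw [this, if_pos trivial]
    · rw [lzero_cons_nz x t h]
      simp only [specB, if_neg h, Nat.add_zero, List.drop_zero]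
      have hc : (0 < (x :: t).length ∧ (x :: t).getD 0 0 = c) ↔ x = c := by
        simp [List.getD]
      rw [if_congr hc rfl rfl]
      have hfill : (if x = c then x else 0) = (if x = c then c else 0) := by
        by_cases hxc : x = c <;> simp [hxc]
      rw [hfill]
      simp

theorem fA_cons_zero (t : List Int) : fA (0 :: t) = 0 :: fA t := by
  rw [fA]; simp

theorem fA_cons_nz (x : Int) (t : List Int) (h : x ≠ 0) :
    fA (x :: t) = x :: fApost t x := by
  rw [fA, fApost]
  simp only [if_neg h]
  by_cases hl : lzero t < t.length
  · simp [hl]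
  · rw [if_neg hl, if_neg hl]
    have hz : lzero t = t.length := by have := lzero_le t; omega
    have := all_zero_eq_replicate t hz
    rw [hz]
    exact congrArg (x :: ·) this

theorem drop_lzero_cons (t : List Int) (h : lzero t < t.length) :
    t.drop (lzero t) = t.getD (lzero t) 0 :: t.drop (lzero t + 1) ∧ t.getD (lzero t) 0 ≠ 0 := by
  induction t with
  | nil => simp at h
  | cons x t ih =>
    by_cases hx : x = 0
    · subst hx
      rw [lzero_cons_zero] at h ⊢
      have h' : lzero t < t.length := by simpa using h
      have := ih h'
      constructor
      · simpa [List.getD] using this.1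
      · simpa [List.getD] using this.2
    · rw [lzero_cons_nz x t hx]
      exact ⟨rfl, hx⟩

theorem specB_eq_fApost (n : Nat) (t : List Int) (c : Int) (hn : t.length ≤ n) :
    specB t c 0 = fApost t c := by
  rw [specB_eq_fill t c 0]
  rw [fApost]
  simp only [Nat.zero_add]
  by_cases h : lzero t < t.length
  · obtain ⟨hds, hne⟩ := drop_lzero_cons t h
    rw [hds]
    set y := t.getD (lzero t) 0 with hy
    have hspec : specB (y :: t.drop (lzero t + 1)) c 0 = y :: specB (t.drop (lzero t + 1)) y 0 := by
      rw [specB]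
      simp [hne]
    rw [hspec]
    cases n with
    | zero => omega
    | succ m =>
      have hrec : specB (t.drop (lzero t + 1)) y 0 = fApost (t.drop (lzero t + 1)) y := by
        apply specB_eq_fApost m
        have : (t.drop (lzero t + 1)).length = t.length - (lzero t + 1) := by simp
        omega
      rw [hrec, fA_cons_nz y _ hne]
      by_cases hc : y = c
      · rw [if_pos ⟨h, hc⟩, if_pos hc, if_pos h]
      · rw [if_neg (by rintro ⟨_, h2⟩; exact hc h2), if_neg hc, if_pos h]
  · rw [if_neg h, if_neg (by rintro ⟨h1, _⟩; exact h h1)]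
    have hz : lzero t = t.length := by have := lzero_le t; omega
    rw [hz, List.drop_length]
    simp [specB]

theorem fApost_zero (t : List Int) :
    fApost t 0 = List.replicate (lzero t) 0
      ++ (if lzero t < t.length then fA (t.drop (lzero t)) else []) := by
  rw [fApost]
  by_cases h : lzero t < t.length
  · rw [if_pos h, if_pos h, ite_self]
  · rw [if_neg h, if_neg h]
    simp

theorem fA_eq_fApost_zero (t : List Int) : fA t = fApost t 0 := by
  induction t with
  | nil => simp [fA, fApost, lzero]
  | cons x t ih =>
    by_cases hx : x = 0
    · subst hx
      rw [fA_cons_zero, ih, fApost_zero, fApost_zero, lzero_cons_zero]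
      have hd : ((0:Int) :: t).drop (lzero t + 1) = t.drop (lzero t) := by simp
      rw [hd, List.length_cons]
      by_cases h : lzero t < t.length
      · rw [if_pos h, if_pos (show lzero t + 1 < t.length + 1 by omega)]
        simp [List.replicate_succ]
      · rw [if_neg h, if_neg (show ¬ lzero t + 1 < t.length + 1 by omega)]
        simp [List.replicate_succ]
    · rw [fApost_zero, lzero_cons_nz x t hx]
      simp

-- B's port equals the forward recursion fA
theorem alt_eq_fA (arr : List Int) : fill_between_equal_colors_line_alt arr = fA arr := by
  rw [alt_eq_specB, specB_eq_fApost arr.length arr 0 le_rfl, fA_eq_fApost_zero]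

-- ===== A-side characterisation =====

theorem drop_cons_getD (l : List Int) (i : Nat) (h : i < l.length) :
    l.drop i = l.getD i 0 :: l.drop (i + 1) := by
  rw [List.getD_eq_getElem l 0 h]
  exact List.drop_eq_getElem_cons h

theorem getD_drop (l : List Int) (m k : Nat) : (l.drop m).getD k 0 = l.getD (m + k) 0 := by
  simp [List.getD_eq_getElem?_getD, List.getElem?_drop]

theorem findJ_eq (out : List Int) (j : Nat) (h : j ≤ out.length) :
    findJ out out.length j = j + lzero (out.drop j) := by
  rw [findJ]
  by_cases hlt : j < out.length
  · have hd := drop_cons_getD out j hlt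
    by_cases hz : out.getD j 0 = 0
    · rw [dif_pos ⟨hlt, hz⟩, findJ_eq out (j + 1) (by omega)]
      rw [hd, hz, lzero_cons_zero]
      omega
    · rw [dif_neg (by rintro ⟨_, h2⟩; exact hz h2)]
      rw [hd, lzero_cons_nz _ _ hz]
      omega
  · rw [dif_neg (by rintro ⟨h1, _⟩; exact hlt h1)]
    have : out.drop j = [] := List.drop_eq_nil_of_le (by omega)
    simp [this, lzero]
termination_by out.length - j
decreasing_by omega

theorem fillSeg_eq (out : List Int) (c : Int) (a b : Nat) (hab : a ≤ b) (hb : b ≤ out.length) :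
    fillSeg out c a b = out.take a ++ List.replicate (b - a) c ++ out.drop b := by
  unfold fillSeg
  rcases Nat.eq_or_lt_of_le hab with he | hlt
  · subst he
    rw [PySem.List.pyRange_one]
    simp [List.take_append_drop]
  · have hcons : PySem.List.pyRange (a : Int) (b : Int) 1
        = (a : Int) :: PySem.List.pyRange ((a : Int) + 1) (b : Int) 1 :=
      PySem.List.pyRange_one_cons (by exact_mod_cast hlt)
    rw [hcons, List.foldl_cons]
    have hset : out.set (a : Int).toNat c = out.take a ++ c :: out.drop (a + 1) := by
      rw [Int.toNat_natCast]
      exact List.set_eq_take_cons_drop c (by omega)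
    have hcast : ((a : Int) + 1) = ((a + 1 : Nat) : Int) := by push_cast; ring
    rw [hset, hcast]
    have hrec := fillSeg_eq (out.take a ++ c :: out.drop (a + 1)) c (a + 1) b
      (by omega) (by simp; omega)
    unfold fillSeg at hrec
    rw [hrec]
    have hlen : (out.take a ++ [c]).length = a + 1 := by simp; omega
    have ht : (out.take a ++ c :: out.drop (a + 1)).take (a + 1) = out.take a ++ [c] := by
      have : out.take a ++ c :: out.drop (a + 1) = (out.take a ++ [c]) ++ out.drop (a + 1) := by simp
      rw [this, ← hlen]
      rw [show (out.take a ++ [c]).length = (out.take a ++ [c]).length + 0 from rfl,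
        List.take_length_add_append]
      simp
    have hdrp : (out.take a ++ c :: out.drop (a + 1)).drop b = out.drop b := by
      have h1 : out.take a ++ c :: out.drop (a + 1) = (out.take a ++ [c]) ++ out.drop (a + 1) := by simp
      rw [h1, show b = (out.take a ++ [c]).length + (b - (a + 1)) from by rw [hlen]; omega,
        List.drop_length_add_append, List.drop_drop]
      congr 1
      omega
    rw [ht, hdrp]
    have hrepl : [c] ++ List.replicate (b - (a + 1)) c = List.replicate (b - a) c := by
      have : b - a = (b - (a + 1)) + 1 := by omega
      rw [this, List.replicate_succ]
      rfl
    rw [← hrepl]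
    simp
termination_by b - a
decreasing_by omega

theorem take_two_append {α : Type} (l1 l2 l3 : List α) (k : Nat)
    (hk : k = l1.length + l2.length) : (l1 ++ l2 ++ l3).take k = l1 ++ l2 := by
  subst hk
  rw [List.append_assoc, List.take_length_add_append]
  congr 1
  rw [show l2.length = l2.length + 0 from rfl, List.take_length_add_append]
  simp

theorem drop_two_append {α : Type} (l1 l2 l3 : List α) (k : Nat)
    (hk : k = l1.length + l2.length) : (l1 ++ l2 ++ l3).drop k = l3 := by
  subst hk
  rw [List.append_assoc, List.drop_length_add_append]
  rw [show l2.length = l2.length + 0 from rfl, List.drop_length_add_append]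
  simp

theorem loopA_eq2 (n : Nat) (out : List Int) (i : Nat) (hn : out.length = n) :
    loopA n out i = out.take i ++ fA (out.drop i) := by
  rw [loopA]
  by_cases h : i < n
  · rw [dif_pos h]
    have hi : i < out.length := by omega
    have hdrop := drop_cons_getD out i hi
    have htake : out.take (i + 1) = out.take i ++ [out.getD i 0] := by
      rw [List.take_add_one, List.getD_eq_getElem out 0 hi]
      simp [List.getElem?_eq_getElem hi]
    by_cases hz : out.getD i 0 = 0
    · rw [if_pos hz, loopA_eq2 n out (i + 1) hn, hdrop, hz, fA_cons_zero]
      rw [htake, hz]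
      simp
    · rw [if_neg hz]
      have hfind : findJ out n (i + 1) = (i + 1) + lzero (out.drop (i + 1)) := by
        subst hn; exact findJ_eq out (i + 1) (by omega)
      set c := out.getD i 0 with hc
      set t' := out.drop (i + 1) with ht'
      set z := lzero t' with hzdef
      have ht'len : t'.length = n - (i + 1) := by rw [ht']; simp; omega
      have hzle : z ≤ t'.length := lzero_le t'
      by_cases hjlt : (i + 1) + z < n
      · have hzlt : z < t'.length := by omega
        obtain ⟨hds, hne⟩ := drop_lzero_cons t' hzlt
        have hgj : out.getD ((i + 1) + z) 0 = t'.getD z 0 := (getD_drop out (i + 1) z).symm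
        by_cases heq : out.getD ((i + 1) + z) 0 = c
        · rw [hfind, if_pos ⟨hjlt, heq⟩]
          have hfse := fillSeg_eq out c (i + 1) ((i + 1) + z) (by omega) (by omega)
          have hlen' : (fillSeg out c (i + 1) ((i + 1) + z)).length = n := by
            rw [hfse]; simp; omega
          rw [loopA_eq2 n _ ((i + 1) + z) hlen', hfse]
          have htk : (out.take (i + 1) ++ List.replicate ((i + 1) + z - (i + 1)) c
              ++ out.drop ((i + 1) + z)).take ((i + 1) + z)
              = out.take (i + 1) ++ List.replicate ((i + 1) + z - (i + 1)) c :=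
            take_two_append _ _ _ _ (by simp; omega)
          have hdp : (out.take (i + 1) ++ List.replicate ((i + 1) + z - (i + 1)) c
              ++ out.drop ((i + 1) + z)).drop ((i + 1) + z) = out.drop ((i + 1) + z) :=
            drop_two_append _ _ _ _ (by simp; omega)
          rw [htk, hdp]
          rw [show (i + 1) + z - (i + 1) = z from by omega]
          -- RHS
          rw [hdrop, fA_cons_nz _ _ hz, fApost]
          simp only [← hzdef]
          rw [if_pos hzlt]
          rw [show t'.getD z 0 = c from by rw [← hgj]; exact heq, if_pos rfl]
          have hdd : t'.drop z = out.drop ((i + 1) + z) := by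
            rw [ht', List.drop_drop]
          rw [hdd, htake]
          simp
        · rw [hfind, if_neg (by rintro ⟨_, h2⟩; exact heq h2)]
          rw [loopA_eq2 n out ((i + 1) + z) hn]
          rw [hdrop, fA_cons_nz _ _ hz, fApost]
          simp only [← hzdef]
          rw [if_pos hzlt]
          rw [if_neg (by rw [← hgj]; exact heq)]
          have hdd : t'.drop z = out.drop ((i + 1) + z) := by
            rw [ht', List.drop_drop]
          have htj : out.take ((i + 1) + z) = out.take (i + 1) ++ List.replicate z 0 := by
            rw [List.take_add, ← ht', hzdef, take_lzero]
          rw [hdd, htj, htake]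
          simp
      · rw [hfind, if_neg (by rintro ⟨h1, _⟩; exact hjlt h1)]
        rw [loopA_eq2 n out ((i + 1) + z) hn]
        have hzeq : z = t'.length := by omega
        have hdnil : out.drop ((i + 1) + z) = [] := by
          apply List.drop_eq_nil_of_le
          omega
        rw [hdnil]
        have hfanil : fA ([] : List Int) = [] := by rw [fA]
        rw [hfanil, List.append_nil]
        rw [hdrop, fA_cons_nz _ _ hz, fApost]
        simp only [← hzdef]
        rw [if_neg (by omega)]
        have ht'rep : List.replicate z (0 : Int) = t' := by
          rw [hzeq]; exact (all_zero_eq_replicate t' (by omega)).symm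
        rw [ht'rep]
        have : out.take ((i + 1) + z) = out.take (i + 1) ++ t' := by
          rw [List.take_add, ← ht', hzeq, List.take_length]
        rw [this, htake]
        simp
  · rw [dif_neg h]
    have hdnil : out.drop i = [] := List.drop_eq_nil_of_le (by omega)
    have htall : out.take i = out := List.take_of_length_le (by omega)
    rw [hdnil, htall]
    rw [show fA ([] : List Int) = [] from by rw [fA]]
    simp
termination_by n - i
decreasing_by
  · omega
  · omega
  · omega
  · omega

-- ===== VERDICT (by name: the statement is the Claim_ definition above) =====
theorem fill_between_equal_colors_line_spec : Claim_equal_fill_between_equal_colors_line := by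
  intro arr _
  unfold Spec_fill_between_equal_colors_line fill_between_equal_colors_line
  rw [alt_eq_fA, loopA_eq2 arr.length arr 0 rfl]
  simp
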